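-- pv_equiv track=rewrite | github.com/sulanaD/ContentForge | agents/editor_agent.py | _optimize_structure
-- ===== SOURCE A (Python) =====
-- def _optimize_structure(text: str) -> str:
--     """Optimize overall content structure."""
--     # Ensure proper heading hierarchy
--     lines = text.split('\n')
--     optimized_lines = []
--
--     for line in lines:
--         # Fix heading levels (ensure logical progression)
--         if line.startswith('#'):
--             # Count heading level
--             level = len(line) - len(line.lstrip('#'))
--             if level > 4:  # Limit to h4
--                 line = '#### ' + line.lstrip('# ')
--
--         optimized_lines.append(line)
--
--     return '\n'.join(optimized_lines)
-- ===== SOURCE B (Python) =====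
-- def _optimize_structure(text: str) -> str:
--     """Optimize overall content structure (single character-level pass, no split/join)."""
--     out = []
--     i = 0
--     n = len(text)
--     while i < n:
--         # i is at the start of a line: count the leading '#' run
--         j = i
--         while j < n and text[j] == '#':
--             j += 1
--         if j - i > 4:
--             # demote to h4: emit '#### ' and skip the whole leading '#'/' ' run
--             while j < n and (text[j] == '#' or text[j] == ' '):
--                 j += 1
--             out.append('#### ')
--             i = j
--         # copy the remainder of the line, including its newline if present
--         k = text.find('\n', i)
--         if k == -1:
--             out.append(text[i:])
--             i = n
--         else:
--             out.append(text[i:k + 1])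
--             i = k + 1
--     return ''.join(out)
-- ===== Notes on version B (the rewrite author's own statement) =====
-- stated objective: alternative
-- what changed: Replaces A's split/per-line-rewrite/join pipeline with a single left-to-right character scan that, at each line start, counts the leading hash run, emits the four-hash-plus-space prefix and skips the hash/space run when the heading is deeper than h4, and copies the rest of the line verbatim; no list of lines is ever built.
import Mathlib
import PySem

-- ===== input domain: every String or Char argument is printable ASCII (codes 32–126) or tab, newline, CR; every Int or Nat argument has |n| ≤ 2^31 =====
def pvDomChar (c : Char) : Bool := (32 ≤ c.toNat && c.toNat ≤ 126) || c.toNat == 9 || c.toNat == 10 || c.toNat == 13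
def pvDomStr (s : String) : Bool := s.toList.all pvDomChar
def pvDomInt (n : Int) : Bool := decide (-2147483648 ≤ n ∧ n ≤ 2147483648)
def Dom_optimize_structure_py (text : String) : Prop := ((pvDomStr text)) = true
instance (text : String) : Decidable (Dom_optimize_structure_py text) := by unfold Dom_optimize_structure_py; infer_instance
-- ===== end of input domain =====

-- B replaces A's split/per-line-rewrite/join pipeline with a single left-to-right
-- character scan that demotes an over-deep heading at each line start and copies the rest
-- of the line verbatim (objective: alternative — no line list is ever materialised).

-- ===== PORT A =====
-- per-line body of A's loop
def pvFixLineA (line : List Char) : List Char :=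
  if PySem.Chars.startswith line ['#'] then
    -- level = len(line) - len(line.lstrip('#')); lstrip('#') ported exactly as dropWhile over the char set {'#'}
    let level : Int := (line.length : Int) - ((line.dropWhile (fun c => c == '#')).length : Int)
    if 4 < level then
      -- '#### ' + line.lstrip('# '); lstrip('# ') ported exactly as dropWhile over the char set {'#',' '}
      "#### ".toList ++ line.dropWhile (fun c => c == '#' || c == ' ')
    else line
  else line

def optimize_structure_py (text : String) : String :=
  let lines := PySem.Chars.splitOn text.toList ['\n']
  let optimized_lines := lines.foldl (fun acc line => acc ++ [pvFixLineA line]) []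
  String.mk (PySem.Chars.join ['\n'] optimized_lines)

-- ===== PORT B =====
-- Source B's inner copy: the rest of the current line (newline included, if any) and the remaining text
def pvCopyLine : List Char → List Char × List Char
  | [] => ([], [])
  | c :: t =>
    if c = '\n' then ([c], t)
    else
      let r := pvCopyLine t
      (c :: r.1, r.2)

theorem pvCopyLine_snd_le (cs : List Char) : (pvCopyLine cs).2.length ≤ cs.length := by
  induction cs with
  | nil => simp [pvCopyLine]
  | cons c t ih =>
    simp only [pvCopyLine]
    split
    · simp
    · simpa using Nat.le_succ_of_le ih

-- Source B's outer while-loop: one pass over the character stream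
def pvGoB : List Char → List Char
  | [] => []
  | c :: t =>
    if h4 : 4 < ((c :: t).takeWhile (fun x => x == '#')).length then
      let r := pvCopyLine ((c :: t).dropWhile (fun x => x == '#' || x == ' '))
      "#### ".toList ++ r.1 ++ pvGoB r.2
    else
      let r := pvCopyLine (c :: t)
      r.1 ++ pvGoB r.2
termination_by cs => cs.length
decreasing_by
  · have hc : (c == '#') = true := by
      by_contra hcc
      simp [hcc] at h4
    have hd : (c :: t).dropWhile (fun x => x == '#' || x == ' ') =
        t.dropWhile (fun x => x == '#' || x == ' ') := by
      simp [hc]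
    calc (pvCopyLine ((c :: t).dropWhile (fun x => x == '#' || x == ' '))).2.length
        ≤ ((c :: t).dropWhile (fun x => x == '#' || x == ' ')).length := pvCopyLine_snd_le _
      _ ≤ t.length := by rw [hd]; exact List.length_dropWhile_le _ _
      _ < (c :: t).length := by simp
  · simp only [pvCopyLine]
    split
    · simp
    · simpa using Nat.lt_succ_of_le (pvCopyLine_snd_le t)

def optimize_structure_py_alt (text : String) : String :=
  String.mk (pvGoB text.toList)

-- ===== PRECONDITION & SPEC =====
def Spec_optimize_structure_py (text : String) (out : String) : Prop := out = optimize_structure_py_alt text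
instance (text : String) (out : String) : Decidable (Spec_optimize_structure_py text out) := by unfold Spec_optimize_structure_py; infer_instance

-- ===== CLAIM (what is proved, stated in full; the proofs are below) =====
def Claim_equal_optimize_structure_py : Prop := ∀ (text : String), Dom_optimize_structure_py text → Spec_optimize_structure_py text (optimize_structure_py text)

-- ===== LEMMAS AND PROOFS =====

-- reference splitter: split at every '\n', structurally
def mySplit : List Char → List (List Char)
  | [] => [[]]
  | c :: t =>
    if c = '\n' then [] :: mySplit t
    else
      match mySplit t with
      | [] => [[c]]
      | s :: ss => (c :: s) :: ss

def pvPrep (x : List Char) : List (List Char) → List (List Char)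
  | [] => [x]
  | s :: ss => (x ++ s) :: ss

theorem mySplit_ne_nil (l : List Char) : mySplit l ≠ [] := by
  cases l with
  | nil => simp [mySplit]
  | cons c t =>
    simp only [mySplit]
    split
    · simp
    · cases h : mySplit t <;> simp

theorem go_spec : ∀ (fuel : Nat) (l cur : List Char) (acc : List (List Char)), l.length < fuel →
    PySem.Chars.splitOn.go ['\n'] fuel l cur acc = acc.reverse ++ pvPrep cur.reverse (mySplit l) := by
  intro fuel
  induction fuel with
  | zero => intro l cur acc h; omega
  | succ n ih =>
    intro l cur acc h
    cases l with
    | nil => simp [PySem.Chars.splitOn.go, mySplit, pvPrep]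
    | cons c rest =>
      rw [PySem.Chars.splitOn.go]
      by_cases hc : c = '\n'
      · subst hc
        simp only [List.isPrefixOf, beq_self_eq_true, Bool.true_and, if_pos, List.length_cons,
          List.drop_succ_cons, List.length_nil, List.drop_zero]
        rw [ih rest [] (List.reverse cur :: acc) (by simpa using Nat.lt_of_succ_lt_succ h)]
        cases hms : mySplit rest with
        | nil => exact absurd hms (mySplit_ne_nil rest)
        | cons s ss => simp [mySplit, pvPrep, hms]
      · have hb : ('\n' == c) = false := by
          simp only [beq_eq_false_iff_ne, ne_eq]
          exact fun hh => hc hh.symm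
        simp only [List.isPrefixOf, hb, Bool.false_and, if_neg, Bool.false_eq_true, not_false_iff]
        rw [ih rest (c :: cur) acc (by simpa using Nat.lt_of_succ_lt_succ h)]
        simp only [mySplit, if_neg hc, List.reverse_cons]
        congr 1
        cases hms : mySplit rest with
        | nil => exact absurd hms (mySplit_ne_nil rest)
        | cons s ss => simp [pvPrep]

theorem splitOn_eq (l : List Char) : PySem.Chars.splitOn l ['\n'] = mySplit l := by
  rw [PySem.Chars.splitOn, go_spec (l.length + 1) l [] [] (by omega)]
  cases h : mySplit l with
  | nil => exact absurd h (mySplit_ne_nil l)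
  | cons s ss => simp [pvPrep]

theorem tw_append {p : Char → Bool} {y : Char} (hy : p y = false) (xs ys : List Char) :
    (xs ++ y :: ys).takeWhile p = xs.takeWhile p := by
  induction xs with
  | nil => simp [hy]
  | cons a l ih => simp [List.takeWhile_cons, ih]

theorem dw_append {p : Char → Bool} {y : Char} (hy : p y = false) (xs ys : List Char) :
    (xs ++ y :: ys).dropWhile p = xs.dropWhile p ++ y :: ys := by
  induction xs with
  | nil => simp [hy]
  | cons a l ih =>
    by_cases ha : p a = true
    · simp [ha, ih]
    · simp [Bool.eq_false_iff.mpr ha]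

theorem length_tw (p : Char → Bool) (l : List Char) :
    (l.takeWhile p).length = l.length - (l.dropWhile p).length := by
  have := congrArg List.length (List.takeWhile_append_dropWhile (p := p) (l := l))
  rw [List.length_append] at this
  omega

theorem fixA_gt (l : List Char) (h : 4 < (l.takeWhile (fun c => c == '#')).length) :
    pvFixLineA l = "#### ".toList ++ l.dropWhile (fun c => c == '#' || c == ' ') := by
  have hdl : (l.dropWhile (fun c => c == '#')).length ≤ l.length := List.length_dropWhile_le _ _
  have hsw : PySem.Chars.startswith l ['#'] = true := by
    cases l with
    | nil => simp at h
    | cons c t =>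
      have hc : (c == '#') = true := by
        by_contra hcc
        simp [hcc] at h
      have hc' : ('#' == c) = true := by
        rw [beq_iff_eq] at hc ⊢; exact hc.symm
      simp only [PySem.Chars.startswith, List.isPrefixOf, hc', Bool.and_true]
  have hlev : (4 : Int) < (l.length : Int) - ((l.dropWhile (fun c => c == '#')).length : Int) := by
    rw [length_tw] at h
    omega
  simp only [pvFixLineA, hsw, if_true, if_pos hlev]

theorem fixA_le (l : List Char) (h : ¬ 4 < (l.takeWhile (fun c => c == '#')).length) :
    pvFixLineA l = l := by
  have hdl : (l.dropWhile (fun c => c == '#')).length ≤ l.length := List.length_dropWhile_le _ _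
  have hlev : ¬ (4 : Int) < (l.length : Int) - ((l.dropWhile (fun c => c == '#')).length : Int) := by
    rw [length_tw] at h
    omega
  simp only [pvFixLineA, if_neg hlev]
  split <;> rfl

theorem copy_no_nl {cs : List Char} (h : '\n' ∉ cs) : pvCopyLine cs = (cs, []) := by
  induction cs with
  | nil => rfl
  | cons c t ih =>
    have hc : ¬ c = '\n' := fun hh => h (hh ▸ List.mem_cons_self)
    simp [pvCopyLine, hc, ih (fun hm => h (List.mem_cons_of_mem _ hm))]

theorem copy_append {l1 : List Char} (h : '\n' ∉ l1) (l2 : List Char) :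
    pvCopyLine (l1 ++ '\n' :: l2) = (l1 ++ ['\n'], l2) := by
  induction l1 with
  | nil => simp [pvCopyLine]
  | cons c t ih =>
    have hc : ¬ c = '\n' := fun hh => h (hh ▸ List.mem_cons_self)
    simp [pvCopyLine, hc, ih (fun hm => h (List.mem_cons_of_mem _ hm))]

theorem mySplit_no_nl {cs : List Char} (h : '\n' ∉ cs) : mySplit cs = [cs] := by
  induction cs with
  | nil => rfl
  | cons c t ih =>
    have hc : ¬ c = '\n' := fun hh => h (hh ▸ List.mem_cons_self)
    simp [mySplit, hc, ih (fun hm => h (List.mem_cons_of_mem _ hm))]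

theorem mySplit_append {l1 : List Char} (h : '\n' ∉ l1) (l2 : List Char) :
    mySplit (l1 ++ '\n' :: l2) = l1 :: mySplit l2 := by
  induction l1 with
  | nil => simp [mySplit]
  | cons c t ih =>
    have hc : ¬ c = '\n' := fun hh => h (hh ▸ List.mem_cons_self)
    simp [mySplit, hc, ih (fun hm => h (List.mem_cons_of_mem _ hm))]

theorem firstNl {cs : List Char} (h : '\n' ∈ cs) :
    ∃ l1 l2, cs = l1 ++ '\n' :: l2 ∧ '\n' ∉ l1 := by
  induction cs with
  | nil => simp at h
  | cons c t ih =>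
    by_cases hc : c = '\n'
    · exact ⟨[], t, by simp [hc], by simp⟩
    · obtain ⟨l1, l2, heq, hn⟩ := ih (by
        rcases List.mem_cons.mp h with h1 | h2
        · exact absurd h1.symm hc
        · exact h2)
      exact ⟨c :: l1, l2, by simp [heq], by
        intro hm
        rcases List.mem_cons.mp hm with h1 | h2
        · exact hc h1.symm
        · exact hn h2⟩

theorem pvGoB_ne_nil_eq (c : Char) (t : List Char) :
    pvGoB (c :: t) =
      if 4 < ((c :: t).takeWhile (fun x => x == '#')).length then
        "#### ".toList ++ (pvCopyLine ((c :: t).dropWhile (fun x => x == '#' || x == ' '))).1 ++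
          pvGoB (pvCopyLine ((c :: t).dropWhile (fun x => x == '#' || x == ' '))).2
      else
        (pvCopyLine (c :: t)).1 ++ pvGoB (pvCopyLine (c :: t)).2 := by
  rw [pvGoB]
  split <;> rfl

theorem keyAux : ∀ (n : Nat) (cs : List Char), cs.length ≤ n →
    pvGoB cs = PySem.Chars.join ['\n'] ((mySplit cs).map pvFixLineA) := by
  intro n
  induction n with
  | zero =>
    intro cs h
    have : cs = [] := List.length_eq_zero_iff.mp (Nat.le_zero.mp h)
    subst this
    have h0 : ¬ 4 < (([] : List Char).takeWhile (fun c => c == '#')).length := by simp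
    rw [mySplit, List.map_singleton, PySem.Chars.join_singleton, fixA_le [] h0, pvGoB]
  | succ n ih =>
    intro cs hlen
    cases cs with
    | nil =>
      have h0 : ¬ 4 < (([] : List Char).takeWhile (fun c => c == '#')).length := by simp
      rw [mySplit, List.map_singleton, PySem.Chars.join_singleton, fixA_le [] h0, pvGoB]
    | cons c t =>
      by_cases hmem : '\n' ∈ (c :: t)
      · obtain ⟨l1, l2, heq, hn1⟩ := firstNl hmem
        have hlen2 : l2.length ≤ n := by
          have h1 := congrArg List.length heq
          simp only [List.length_cons, List.length_append] at h1
          simp only [List.length_cons] at hlen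
          omega
        rw [pvGoB_ne_nil_eq, heq, mySplit_append hn1,
          tw_append (p := fun x => x == '#') (y := '\n') (by decide) l1 l2]
        by_cases h4 : 4 < (l1.takeWhile (fun x => x == '#')).length
        · rw [if_pos h4,
            dw_append (p := fun x => x == '#' || x == ' ') (y := '\n') (by decide) l1 l2]
          have hnd : '\n' ∉ l1.dropWhile (fun x => x == '#' || x == ' ') :=
            fun hm => hn1 ((List.dropWhile_sublist _).mem hm)
          rw [copy_append hnd, ih l2 hlen2]
          cases hms : mySplit l2 with
          | nil => exact absurd hms (mySplit_ne_nil l2)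
          | cons s ss =>
            simp only [List.map_cons]
            rw [fixA_gt l1 h4]
            rw [PySem.Chars.join_cons_cons]
            simp [List.append_assoc]
        · rw [if_neg h4, copy_append hn1, ih l2 hlen2]
          cases hms : mySplit l2 with
          | nil => exact absurd hms (mySplit_ne_nil l2)
          | cons s ss =>
            simp only [List.map_cons]
            rw [fixA_le l1 h4]
            rw [PySem.Chars.join_cons_cons]
      · rw [pvGoB_ne_nil_eq, mySplit_no_nl hmem]
        by_cases h4 : 4 < ((c :: t).takeWhile (fun x => x == '#')).length
        · rw [if_pos h4]
          have hnd : '\n' ∉ (c :: t).dropWhile (fun x => x == '#' || x == ' ') :=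
            fun hm => hmem ((List.dropWhile_sublist _).mem hm)
          rw [copy_no_nl hnd, List.map_singleton, PySem.Chars.join_singleton, fixA_gt _ h4]
          simp [pvGoB]
        · rw [if_neg h4, copy_no_nl hmem, List.map_singleton, PySem.Chars.join_singleton,
            fixA_le _ h4]
          simp [pvGoB]

-- ===== VERDICT (by name: the statement is the Claim_ definition above) =====
theorem optimize_structure_py_spec : Claim_equal_optimize_structure_py := by
  intro text _
  unfold Spec_optimize_structure_py optimize_structure_py optimize_structure_py_alt
  simp only [splitOn_eq, PySem.List.foldl_append_singleton_eq_map, List.nil_append]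
  rw [keyAux text.toList.length text.toList le_rfl]
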